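-- pv_equiv track=rewrite | github.com/import1234/AlgorithmPS | 백준/Gold/2448. 별 찍기 － 11/별 찍기 － 11.py | f
-- ===== SOURCE A (Python) =====
-- def f(k,n):
--     l=[]
--     if k==0:
--         if n==1:
--             l=['*','* *','*****']
--         else:
--             a=f(0,1)
--             for x in range(3):l.append(a[x]+' '*(5-2*x)+a[x])
--     else:
--         if n==1:
--             a=f(k-1,1)
--             for x in range(3*2**(k-1)):l.append(a[x])
--             b=f(k-1,2)
--             for x in range(3*2**(k-1)):l.append(b[x])
--         else:
--             t=[]
--             a=f(k-1,1)
--             for x in range(3*2**(k-1)):t.append(a[x])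
--             b=f(k-1,2)
--             for x in range(3*2**(k-1)):t.append(b[x])
--             for x in range(3*2**k):l.append(t[x]+' '*(3*2**(k+1)-1-2*x)+t[x])
--     return l
-- ===== SOURCE B (Python) =====
-- def f(k, n):
--     g = ['*', '* *', '*****']
--     for _ in range(k):
--         L = len(g)
--         g = g + [g[x] + ' ' * (2 * L - 1 - 2 * x) + g[x] for x in range(L)]
--     if n != 1:
--         L = len(g)
--         g = [g[x] + ' ' * (2 * L - 1 - 2 * x) + g[x] for x in range(L)]
--     return g
-- ===== Notes on version B (the rewrite author's own statement) =====
-- stated objective: simpler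
-- what changed: Replaced the four-way mutual recursion on (k,n) with an iterative bottom-up build: start from the base triangle, double it k times (f(k,1) = f(k-1,1) stacked on its horizontal doubling), and apply one final horizontal-doubling pass when n != 1.
import Mathlib
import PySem

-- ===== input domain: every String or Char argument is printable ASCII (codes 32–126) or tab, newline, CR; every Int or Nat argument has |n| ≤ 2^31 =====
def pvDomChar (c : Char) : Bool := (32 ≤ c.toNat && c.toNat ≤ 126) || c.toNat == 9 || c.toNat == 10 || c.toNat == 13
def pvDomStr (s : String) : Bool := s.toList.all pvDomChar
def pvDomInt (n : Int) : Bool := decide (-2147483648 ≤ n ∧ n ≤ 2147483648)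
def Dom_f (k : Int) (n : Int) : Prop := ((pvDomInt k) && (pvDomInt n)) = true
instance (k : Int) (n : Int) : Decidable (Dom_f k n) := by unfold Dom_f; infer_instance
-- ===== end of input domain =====

-- B simplifies A's four-way mutual recursion to an iterative bottom-up build (double k times, then
-- one horizontal-doubling pass when n != 1); equal cost, no speed claim.

-- ' ' * m  (Python: a negative count gives ''; toNat clamps exactly the same way) — shared primitive
def pySpaces (m : Int) : String := String.ofList (List.replicate m.toNat ' ')

-- ===== PORT A =====
-- A's recursion diverges for k < 0 (Python RecursionError), so the port carries a fuel argument;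
-- with fuel out it returns [] (only reachable outside Pre_f). a[x] is ported with pyGetD "" —
-- inside Pre_f the index is always in range, so this is exact where Python returns.
def fA : Nat → Int → Int → List String
  | 0, _, _ => []
  | fuel+1, k, n =>
    if k = 0 then
      if n = 1 then ["*", "* *", "*****"]
      else
        let a := fA fuel 0 1
        (PySem.List.pyRange 0 3 1).foldl
          (fun l x => l ++ [PySem.List.pyGetD a x "" ++ pySpaces (5 - 2*x) ++ PySem.List.pyGetD a x ""]) []
    else
      if n = 1 then
        let a := fA fuel (k-1) 1
        let l := (PySem.List.pyRange 0 (3 * 2 ^ (k-1).toNat) 1).foldl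
          (fun l x => l ++ [PySem.List.pyGetD a x ""]) []
        let b := fA fuel (k-1) 2
        (PySem.List.pyRange 0 (3 * 2 ^ (k-1).toNat) 1).foldl
          (fun l x => l ++ [PySem.List.pyGetD b x ""]) l
      else
        let a := fA fuel (k-1) 1
        let t := (PySem.List.pyRange 0 (3 * 2 ^ (k-1).toNat) 1).foldl
          (fun t x => t ++ [PySem.List.pyGetD a x ""]) []
        let b := fA fuel (k-1) 2
        let t := (PySem.List.pyRange 0 (3 * 2 ^ (k-1).toNat) 1).foldl
          (fun t x => t ++ [PySem.List.pyGetD b x ""]) t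
        (PySem.List.pyRange 0 (3 * 2 ^ k.toNat) 1).foldl
          (fun l x => l ++ [PySem.List.pyGetD t x "" ++ pySpaces (3 * 2 ^ (k.toNat + 1) - 1 - 2*x) ++ PySem.List.pyGetD t x ""]) []

def f (k : Int) (n : Int) : List String := fA (k.toNat + 2) k n

-- ===== PORT B =====
-- the comprehension [g[x]+' '*(2*L-1-2*x)+g[x] for x in range(L)]
def pvDbl (g : List String) : List String :=
  (PySem.List.pyRange 0 (g.length : Int) 1).map
    (fun x => PySem.List.pyGetD g x "" ++ pySpaces (2 * (g.length : Int) - 1 - 2*x) ++ PySem.List.pyGetD g x "")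

def f_alt (k : Int) (n : Int) : List String :=
  let g := (PySem.List.pyRange 0 k 1).foldl (fun g _ => g ++ pvDbl g) ["*", "* *", "*****"]
  if n ≠ 1 then pvDbl g else g

-- ===== PRECONDITION & SPEC =====
-- A recurses without bound (RecursionError) for k < 0; those inputs are excluded.
def Pre_f (k : Int) (n : Int) : Prop := 0 ≤ k
instance (k : Int) (n : Int) : Decidable (Pre_f k n) := by unfold Pre_f; infer_instance
def pvWitness_f : Int × Int := (2, 1)

def Spec_f (k : Int) (n : Int) (out : List String) : Prop := out = f_alt k n
instance (k : Int) (n : Int) (out : List String) : Decidable (Spec_f k n out) := by unfold Spec_f; infer_instance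

-- ===== CLAIM (what is proved, stated in full; the proofs are below) =====
def Claim_equal_f : Prop := ∀ (k : Int) (n : Int), Dom_f k n → Pre_f k n → Spec_f k n (f k n)

-- ===== LEMMAS AND PROOFS =====

-- the bottom-up tower: G j = f(j,1)
def pvG : Nat → List String
  | 0 => ["*", "* *", "*****"]
  | j+1 => pvG j ++ pvDbl (pvG j)

theorem pvDbl_length (g : List String) : (pvDbl g).length = g.length := by
  simp [pvDbl, PySem.List.length_pyRange_one]

theorem pvG_length (j : Nat) : (pvG j).length = 3 * 2 ^ j := by
  induction j with
  | zero => rfl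
  | succ j ih => simp [pvG, pvDbl_length, ih]; ring

-- copying loop: [a[x] for x in range(len(a))] = a
theorem map_pyRange_pyGetD {α : Type} (a : List α) (d : α) :
    (PySem.List.pyRange 0 (a.length : Int) 1).map (fun x => PySem.List.pyGetD a x d) = a := by
  apply List.ext_getElem
  · simp [PySem.List.length_pyRange_one]
  · intro i h1 h2
    rw [List.getElem_map, PySem.List.getElem_pyRange_one]
    have : ((0 : Int) + i) = (i : Int) := by omega
    rw [this, PySem.List.pyGetD_natCast, List.getD_eq_getElem]

theorem foldl_copy {α : Type} (a acc : List α) (d : α) (m : Int) (hm : m = (a.length : Int)) :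
    (PySem.List.pyRange 0 m 1).foldl (fun l x => l ++ [PySem.List.pyGetD a x d]) acc = acc ++ a := by
  rw [hm, PySem.List.foldl_append_singleton_eq_map, map_pyRange_pyGetD]

-- the doubling loop equals pvDbl
theorem foldl_dbl (t acc : List String) (m s : Int)
    (hm : m = (t.length : Int)) (hs : s = 2 * (t.length : Int) - 1) :
    (PySem.List.pyRange 0 m 1).foldl
      (fun l x => l ++ [PySem.List.pyGetD t x "" ++ pySpaces (s - 2*x) ++ PySem.List.pyGetD t x ""]) acc
    = acc ++ pvDbl t := by
  subst hm hs
  rw [PySem.List.foldl_append_singleton_eq_map, pvDbl]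

theorem fA_zero_one (fuel : Nat) (h : 1 ≤ fuel) : fA fuel 0 1 = ["*", "* *", "*****"] := by
  cases fuel with
  | zero => omega
  | succ fuel => simp [fA]

theorem fA_spec (kn : Nat) : ∀ (fuel : Nat), kn + 2 ≤ fuel → ∀ (n : Int),
    fA fuel (kn : Int) n = if n = 1 then pvG kn else pvDbl (pvG kn) := by
  induction kn with
  | zero =>
    intro fuel hf n
    cases fuel with
    | zero => omega
    | succ fuel =>
      by_cases hn : n = 1
      · simp [fA, hn, pvG]
      · simp only [fA, if_neg hn]
        rw [fA_zero_one fuel (by omega)]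
        rw [foldl_dbl _ _ _ 5 (by rfl) (by rfl)]
        simp [pvG]
  | succ kn ih =>
    intro fuel hf n
    cases fuel with
    | zero => omega
    | succ fuel =>
      have hk0 : ((kn : Int) + 1) ≠ 0 := by omega
      have hk1 : ((kn : Int) + 1 - 1) = (kn : Int) := by omega
      have hkt : ((kn : Int) + 1 - 1).toNat = kn := by omega
      have hkt2 : ((kn : Int) + 1).toNat = kn + 1 := by omega
      have hknt : ((kn : Int)).toNat = kn := by omega
      have ha : fA fuel (kn : Int) 1 = pvG kn := by rw [ih fuel (by omega) 1]; simp
      have hb : fA fuel (kn : Int) 2 = pvDbl (pvG kn) := by rw [ih fuel (by omega) 2]; norm_num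
      have hla : ((3 : Int) * 2 ^ kn) = ((pvG kn).length : Int) := by
        rw [pvG_length]; push_cast; ring
      have hlb : ((3 : Int) * 2 ^ kn) = ((pvDbl (pvG kn)).length : Int) := by
        rw [pvDbl_length, pvG_length]; push_cast; ring
      have hcast : ((kn + 1 : Nat) : Int) = (kn : Int) + 1 := by push_cast; ring
      rw [hcast]
      by_cases hn : n = 1
      · simp only [fA, if_neg hk0, if_pos hn, hk1, hknt, ha, hb]
        rw [foldl_copy _ _ _ _ hla, foldl_copy _ _ _ _ hlb]
        simp [pvG]
      · simp only [fA, if_neg hk0, if_neg hn, hk1, hknt, hkt2, ha, hb]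
        rw [foldl_copy _ _ _ _ hla, foldl_copy _ _ _ _ hlb]
        rw [foldl_dbl _ _ _ _ (by simp [pvG_length, pvDbl_length]; ring)
              (by simp [pvG_length, pvDbl_length]; ring)]
        simp [pvG]

theorem f_alt_fold (j : Nat) :
    (PySem.List.pyRange 0 (j : Int) 1).foldl (fun g _ => g ++ pvDbl g) ["*", "* *", "*****"] = pvG j := by
  induction j with
  | zero => simp [PySem.List.pyRange_one_eq_nil, pvG]
  | succ j ih =>
    have : ((j + 1 : Nat) : Int) = (j : Int) + 1 := by push_cast; ring
    rw [this, PySem.List.pyRange_one_succ_right (a := 0) (b := (j : Int)) (by omega), List.foldl_append, ih]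
    simp [pvG]

-- ===== VERDICT (by name: the statement is the Claim_ definition above) =====
theorem f_spec : Claim_equal_f := by
  intro k n _ hpre
  have hk : ((k.toNat : Nat) : Int) = k := Int.toNat_of_nonneg hpre
  unfold Spec_f f f_alt
  rw [← hk]
  simp only [Int.toNat_natCast]
  rw [fA_spec k.toNat (k.toNat + 2) (by omega) n, f_alt_fold]
  by_cases hn : n = 1 <;> simp [hn]
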